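-- pv_equiv track=rewrite | github.com/hepingan11/FastPosition | app/services/job_crawler_service.py | looks_like_real_job_list
-- ===== SOURCE A (Python) =====
-- def looks_like_real_job_list(positions: list[dict], base_url: str = "") -> bool:
--     if not positions:
--         return False
--
--     sample = positions[: min(len(positions), 10)]
--     rich_items = 0
--     detail_links = 0
--     filled_locations = 0
--     filled_descriptions = 0
--
--     for item in sample:
--         extras = 0
--         if item.get("location"):
--             filled_locations += 1
--             extras += 1
--         if item.get("salary"):
--             extras += 1
--         if item.get("jd"):
--             filled_descriptions += 1
--             extras += 1
--         link = item.get("link")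
--         if link and link != base_url:
--             detail_links += 1
--             extras += 1
--         if extras >= 1:
--             rich_items += 1
--
--     # 城市/枚举接口通常只有 name，没有地点、详情链接、JD 这些职位特征
--     if rich_items == 0:
--         return False
--     if detail_links == 0 and filled_locations == 0 and filled_descriptions == 0:
--         return False
--     return True
-- ===== SOURCE B (Python) =====
-- def looks_like_real_job_list(positions: list[dict], base_url: str = "") -> bool:
--     # Column-wise decomposition: instead of walking items once accumulating four
--     # counters, scan the first-10 sample once PER SIGNAL FIELD and combine the
--     # three field-level verdicts. A salary-only list fails A's second post-loop
--     # check, so the salary column is irrelevant to the result.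
--     sample = positions[:10]
--     has_location = any(it.get("location") for it in sample)
--     has_description = any(it.get("jd") for it in sample)
--     has_detail_link = any(it.get("link") and it.get("link") != base_url
--                           for it in sample)
--     return has_location or has_description or has_detail_link
-- ===== Notes on version B (the rewrite author's own statement) =====
-- stated objective: simpler
-- what changed: Replaced A's row-wise loop with four accumulating counters and two post-loop threshold checks by three independent column-wise scans (one per signal field: location, jd, detail link) combined by disjunction, after proving the salary branch and the rich_items counter redundant.
import Mathlib
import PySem

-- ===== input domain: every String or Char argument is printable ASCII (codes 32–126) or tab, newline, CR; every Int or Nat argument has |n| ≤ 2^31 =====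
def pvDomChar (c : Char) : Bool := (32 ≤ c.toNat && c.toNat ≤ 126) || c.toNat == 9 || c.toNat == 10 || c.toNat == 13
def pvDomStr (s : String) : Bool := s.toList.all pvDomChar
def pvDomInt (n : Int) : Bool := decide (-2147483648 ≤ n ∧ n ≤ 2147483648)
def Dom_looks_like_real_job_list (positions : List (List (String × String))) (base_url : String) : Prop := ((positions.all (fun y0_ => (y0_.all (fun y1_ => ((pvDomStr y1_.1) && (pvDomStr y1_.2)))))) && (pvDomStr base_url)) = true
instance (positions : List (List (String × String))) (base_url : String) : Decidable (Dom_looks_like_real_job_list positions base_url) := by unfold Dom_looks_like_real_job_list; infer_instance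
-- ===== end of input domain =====

-- B replaces A's row-wise counting loop (four accumulators + two post-loop checks) by three
-- independent column-wise scans of the sample, one per signal field; objective: simpler, same cost.
-- ===== PORT A =====
-- loop body of A: state = (rich_items, detail_links, filled_locations, filled_descriptions)
def pvStepA (base_url : String) (st : Int × Int × Int × Int) (item : List (String × String)) : Int × Int × Int × Int :=
  let d := PySem.Dict.mk item
  let c1 : Bool := (d.get? "location").getD "" != ""
  let c2 : Bool := (d.get? "salary").getD "" != ""
  let c3 : Bool := (d.get? "jd").getD "" != ""
  let link := (d.get? "link").getD ""
  let c4 : Bool := (link != "") && (link != base_url)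
  let extras : Int := (if c1 then 1 else 0) + (if c2 then 1 else 0) + (if c3 then 1 else 0) + (if c4 then 1 else 0)
  (st.1 + (if extras ≥ 1 then 1 else 0),
   st.2.1 + (if c4 then 1 else 0),
   st.2.2.1 + (if c1 then 1 else 0),
   st.2.2.2 + (if c3 then 1 else 0))

def looks_like_real_job_list (positions : List (List (String × String))) (base_url : String) : Bool :=
  if positions = [] then false
  else
    let sample := positions.take (min positions.length 10)
    let st := sample.foldl (pvStepA base_url) (0, 0, 0, 0)
    if st.1 = 0 then false
    else if st.2.1 = 0 ∧ st.2.2.1 = 0 ∧ st.2.2.2 = 0 then false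
    else true

-- ===== PORT B =====
-- B: three column-wise passes, one per signal field, combined by disjunction
def looks_like_real_job_list_alt (positions : List (List (String × String))) (base_url : String) : Bool :=
  let sample := positions.take 10
  let has_location := sample.any (fun it => ((PySem.Dict.mk it).get? "location").getD "" != "")
  let has_description := sample.any (fun it => ((PySem.Dict.mk it).get? "jd").getD "" != "")
  let has_detail_link := sample.any (fun it =>
    (((PySem.Dict.mk it).get? "link").getD "" != "") && (((PySem.Dict.mk it).get? "link").getD "" != base_url))
  has_location || has_description || has_detail_link

-- ===== PRECONDITION & SPEC =====
def Spec_looks_like_real_job_list (positions : List (List (String × String))) (base_url : String) (out : Bool) : Prop := out = looks_like_real_job_list_alt positions base_url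
instance (positions : List (List (String × String))) (base_url : String) (out : Bool) : Decidable (Spec_looks_like_real_job_list positions base_url out) := by unfold Spec_looks_like_real_job_list; infer_instance

-- ===== CLAIM =====
def Claim_equal_looks_like_real_job_list : Prop := ∀ (positions : List (List (String × String))) (base_url : String), Dom_looks_like_real_job_list positions base_url → Spec_looks_like_real_job_list positions base_url (looks_like_real_job_list positions base_url)

-- ===== LEMMAS AND PROOFS =====
-- proof-side notion: an item carries a signal (location, jd, or detail link ≠ base_url)
def pvSignal (base_url : String) (it : List (String × String)) : Bool :=
  let d := PySem.Dict.mk it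
  ((d.get? "location").getD "" != "") || ((d.get? "jd").getD "" != "") ||
    (((d.get? "link").getD "" != "") && ((d.get? "link").getD "" != base_url))

lemma pv_take_min {α : Type} (l : List α) (n : Nat) : l.take (min l.length n) = l.take n := by
  rcases Nat.le_total l.length n with h | h
  · rw [min_eq_left h, List.take_length, List.take_of_length_le h]
  · rw [min_eq_right h]

lemma pv_any_or {α : Type} (l : List α) (f g : α → Bool) :
    l.any (fun x => f x || g x) = (l.any f || l.any g) := by
  induction l with
  | nil => simp
  | cons hd tl ih => simp only [List.any_cons, ih]; cases f hd <;> cases g hd <;> simp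

-- B's three column scans coincide with the existential over pvSignal
lemma pv_alt_eq_any (positions : List (List (String × String))) (base_url : String) :
    looks_like_real_job_list_alt positions base_url = (positions.take 10).any (pvSignal base_url) := by
  unfold looks_like_real_job_list_alt pvSignal
  rw [pv_any_or, pv_any_or]

-- one step of A's fold: a signal item bumps rich and one of the three counters;
-- a non-signal item (at most a salary) leaves the three counters unchanged; rich never decreases.
lemma pv_step_key (base : String) (st : Int × Int × Int × Int) (hd : List (String × String)) :
    (pvSignal base hd = true →
      st.1 + 1 ≤ (pvStepA base st hd).1 ∧ st.2.1 ≤ (pvStepA base st hd).2.1 ∧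
      st.2.2.1 ≤ (pvStepA base st hd).2.2.1 ∧ st.2.2.2 ≤ (pvStepA base st hd).2.2.2 ∧
      st.2.1 + st.2.2.1 + st.2.2.2 + 1 ≤ (pvStepA base st hd).2.1 + (pvStepA base st hd).2.2.1 + (pvStepA base st hd).2.2.2) ∧
    (pvSignal base hd = false →
      st.1 ≤ (pvStepA base st hd).1 ∧
      (pvStepA base st hd).2.1 = st.2.1 ∧ (pvStepA base st hd).2.2.1 = st.2.2.1 ∧
      (pvStepA base st hd).2.2.2 = st.2.2.2) := by
  simp only [pvSignal, pvStepA]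
  generalize (((PySem.Dict.mk hd).get? "location").getD "" != "") = b1
  generalize (((PySem.Dict.mk hd).get? "salary").getD "" != "") = b2
  generalize (((PySem.Dict.mk hd).get? "jd").getD "" != "") = b3
  generalize (((PySem.Dict.mk hd).get? "link").getD "" != "") = b4
  generalize (((PySem.Dict.mk hd).get? "link").getD "" != base) = b5
  cases b1 <;> cases b2 <;> cases b3 <;> cases b4 <;> cases b5 <;> simp <;> omega

-- invariant of A's whole fold
lemma pv_fold_inv (base : String) (l : List (List (String × String))) (st : Int × Int × Int × Int) :
    (if l.any (pvSignal base) then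
      st.1 + 1 ≤ (l.foldl (pvStepA base) st).1 ∧
      st.2.1 ≤ (l.foldl (pvStepA base) st).2.1 ∧
      st.2.2.1 ≤ (l.foldl (pvStepA base) st).2.2.1 ∧
      st.2.2.2 ≤ (l.foldl (pvStepA base) st).2.2.2 ∧
      st.2.1 + st.2.2.1 + st.2.2.2 + 1 ≤ (l.foldl (pvStepA base) st).2.1 + (l.foldl (pvStepA base) st).2.2.1 + (l.foldl (pvStepA base) st).2.2.2
    else
      st.1 ≤ (l.foldl (pvStepA base) st).1 ∧
      (l.foldl (pvStepA base) st).2.1 = st.2.1 ∧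
      (l.foldl (pvStepA base) st).2.2.1 = st.2.2.1 ∧
      (l.foldl (pvStepA base) st).2.2.2 = st.2.2.2) := by
  induction l generalizing st with
  | nil => simp
  | cons hd tl ih =>
    have h := ih (pvStepA base st hd)
    have key := pv_step_key base st hd
    simp only [List.any_cons, List.foldl_cons]
    by_cases hs : pvSignal base hd = true
    · obtain ⟨k1, k2, k3, k4, k5⟩ := key.1 hs
      simp only [hs, Bool.true_or, if_true]
      by_cases ht : tl.any (pvSignal base) = true
      · rw [if_pos ht] at h
        obtain ⟨h1, h2, h3, h4, h5⟩ := h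
        exact ⟨by omega, by omega, by omega, by omega, by omega⟩
      · rw [if_neg ht] at h
        obtain ⟨h0, h1, h2, h3⟩ := h
        exact ⟨by omega, by omega, by omega, by omega, by omega⟩
    · have hs' : pvSignal base hd = false := by simpa using hs
      obtain ⟨k0, k1, k2, k3⟩ := key.2 hs'
      simp only [hs', Bool.false_or]
      by_cases ht : tl.any (pvSignal base) = true
      · rw [if_pos ht] at h; rw [if_pos ht]
        obtain ⟨h1, h2, h3, h4, h5⟩ := h
        exact ⟨by omega, by omega, by omega, by omega, by omega⟩
      · rw [if_neg ht] at h; rw [if_neg ht]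
        obtain ⟨h0, h1, h2, h3⟩ := h
        exact ⟨by omega, by omega, by omega, by omega⟩

-- ===== VERDICT =====
theorem looks_like_real_job_list_spec : Claim_equal_looks_like_real_job_list := by
  intro positions base_url _
  unfold Spec_looks_like_real_job_list
  rw [pv_alt_eq_any]
  unfold looks_like_real_job_list
  rcases positions with _ | ⟨p, ps⟩
  · simp
  · simp only [if_neg (List.cons_ne_nil p ps), pv_take_min]
    have h := pv_fold_inv base_url ((p :: ps).take 10) (0, 0, 0, 0)
    by_cases hany : ((p :: ps).take 10).any (pvSignal base_url) = true
    · rw [if_pos hany] at h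
      rw [hany]
      obtain ⟨h1, h2, h3, h4, h5⟩ := h
      have e1 : ((0:Int), (0:Int), (0:Int), (0:Int)).1 = 0 := rfl
      have e2 : ((0:Int), (0:Int), (0:Int), (0:Int)).2.1 = 0 := rfl
      have e3 : ((0:Int), (0:Int), (0:Int), (0:Int)).2.2.1 = 0 := rfl
      have e4 : ((0:Int), (0:Int), (0:Int), (0:Int)).2.2.2 = 0 := rfl
      simp only [e1, e2, e3, e4] at h1 h2 h3 h4 h5
      rw [if_neg (by omega), if_neg (by omega)]
    · have hany' : ((p :: ps).take 10).any (pvSignal base_url) = false := by simpa using hany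
      rw [if_neg hany] at h
      rw [hany']
      obtain ⟨h0, h1, h2, h3⟩ := h
      have e2 : ((0:Int), (0:Int), (0:Int), (0:Int)).2.1 = 0 := rfl
      have e3 : ((0:Int), (0:Int), (0:Int), (0:Int)).2.2.1 = 0 := rfl
      have e4 : ((0:Int), (0:Int), (0:Int), (0:Int)).2.2.2 = 0 := rfl
      simp only [e2, e3, e4] at h1 h2 h3
      by_cases hr : (((p :: ps).take 10).foldl (pvStepA base_url) (0, 0, 0, 0)).1 = 0
      · rw [if_pos hr]
      · rw [if_neg hr, if_pos (by omega)]
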